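-- pv_equiv track=rewrite | github.com/travsart/TrinityCore-Master-Moon-of-Dragon.com-Custom | refactor_templates.py | should_skip_line
-- ===== SOURCE A (Python) =====
-- def should_skip_line(line: str) -> bool:
--     """Check if line should skip replacement (comments, strings)."""
--     stripped = line.strip()
--     # Skip pure comment lines
--     if stripped.startswith('//'):
--         return True
--     # Skip lines that are likely in string literals (very basic check)
--     if '"' in line and not 'this->' in line:
--         # More complex check would be needed for multi-line strings
--         in_string = False
--         escape_next = False
--         for char in line:
--             if escape_next:
--                 escape_next = False
--                 continue
--             if char == '\\':
--                 escape_next = True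
--                 continue
--             if char == '"':
--                 in_string = not in_string
--         # If we end in a string, might be multi-line
--         if in_string:
--             return True
--     return False
-- ===== SOURCE B (Python) =====
-- def should_skip_line(line: str) -> bool:
--     """Check if line should skip replacement (comments, strings)."""
--     stripped = line.strip()
--     if stripped.startswith('//'):
--         return True
--     if '"' in line and 'this->' not in line:
--         # Loop-free: first delete every escaped backslash pair, then every
--         # escaped quote; what is left contains exactly the unescaped quotes.
--         reduced = line.replace('\\\\', '').replace('\\"', '')
--         return reduced.count('"') % 2 == 1
--     return False
-- ===== Notes on version B (the rewrite author's own statement) =====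
-- stated objective: simpler
-- what changed: Replaced A's per-character in_string/escape_next state machine with a loop-free pipeline: two global string replacements (delete every '\\' pair, then every '\"') followed by a parity test on the remaining double-quote count.
import Mathlib
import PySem

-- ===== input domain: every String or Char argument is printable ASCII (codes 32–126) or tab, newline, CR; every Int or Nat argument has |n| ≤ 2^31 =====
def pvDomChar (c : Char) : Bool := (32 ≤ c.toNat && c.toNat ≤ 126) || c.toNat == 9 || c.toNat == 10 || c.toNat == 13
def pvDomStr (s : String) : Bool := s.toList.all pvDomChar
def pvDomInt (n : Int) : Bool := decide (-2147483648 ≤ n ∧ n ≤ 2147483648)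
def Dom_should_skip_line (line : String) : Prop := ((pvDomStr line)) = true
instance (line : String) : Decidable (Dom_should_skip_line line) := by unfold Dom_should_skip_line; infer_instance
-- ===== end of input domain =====

-- B replaces A's per-character escape state machine with two loop-free global
-- string replacements (drop '\\' pairs, then drop '\"') followed by a
-- quote-count parity test; objective: simpler.


-- ===== PORT A =====
-- the for-loop's state: (in_string, escape_next)
def pvStepA (st : Bool × Bool) (c : Char) : Bool × Bool :=
  if st.2 then (st.1, false)
  else if c = '\\' then (st.1, true)
  else if c = '"' then (!st.1, st.2)
  else st

def should_skip_line (line : String) : Bool :=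
  let stripped := PySem.Str.strip line
  if PySem.Str.startswith stripped "//" then true
  else if PySem.Str.isIn "\"" line && !(PySem.Str.isIn "this->" line) then
    let st := line.toList.foldl pvStepA (false, false)
    if st.1 then true else false
  else false

-- ===== PORT B =====
def should_skip_line_alt (line : String) : Bool :=
  let stripped := PySem.Str.strip line
  if PySem.Str.startswith stripped "//" then true
  else if PySem.Str.isIn "\"" line && !(PySem.Str.isIn "this->" line) then
    let reduced := PySem.Str.replace (PySem.Str.replace line "\\\\" "") "\\\"" ""
    PySem.Str.count reduced "\"" % 2 == 1
  else false

-- ===== PRECONDITION & SPEC =====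
def Spec_should_skip_line (line : String) (out : Bool) : Prop := out = should_skip_line_alt line
instance (line : String) (out : Bool) : Decidable (Spec_should_skip_line line out) := by unfold Spec_should_skip_line; infer_instance

-- ===== CLAIM (what is proved, stated in full; the proofs are below) =====
def Claim_equal_should_skip_line : Prop := ∀ (line : String), Dom_should_skip_line line → Spec_should_skip_line line (should_skip_line line)

-- ===== LEMMAS AND PROOFS =====

-- structural model of s.replace('\\\\', '')
def pvR1 : List Char → List Char
  | [] => []
  | '\\' :: '\\' :: u => pvR1 u
  | c :: t => c :: pvR1 t

-- structural model of s.replace('\\"', '')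
def pvR2 : List Char → List Char
  | [] => []
  | '\\' :: '"' :: u => pvR2 u
  | c :: t => c :: pvR2 t

theorem pvR1_cons_ne (c : Char) (t : List Char) (h : c ≠ '\\') :
    pvR1 (c::t) = c :: pvR1 t := by
  rw [pvR1.eq_def]
  split
  · next heq => exact absurd heq (by simp)
  · next heq => injection heq with h1 h2; exact absurd h1 h
  · next heq => injection heq with h1 h2; subst h1; subst h2; rfl

theorem pvR1_bs_ne (d : Char) (u : List Char) (h : d ≠ '\\') :
    pvR1 ('\\'::d::u) = '\\' :: pvR1 (d::u) := by
  rw [pvR1.eq_def]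
  split
  · next heq => exact absurd heq (by simp)
  · next heq =>
      injection heq with h1 h2; injection h2 with h3 h4; exact absurd h3 h
  · next heq => injection heq with h1 h2; subst h1; subst h2; rfl

theorem pvR2_cons_ne (c : Char) (t : List Char) (h : c ≠ '\\') :
    pvR2 (c::t) = c :: pvR2 t := by
  rw [pvR2.eq_def]
  split
  · next heq => exact absurd heq (by simp)
  · next heq => injection heq with h1 h2; exact absurd h1 h
  · next heq => injection heq with h1 h2; subst h1; subst h2; rfl

theorem pvR2_bs_ne (d : Char) (u : List Char) (h : d ≠ '"') :
    pvR2 ('\\'::d::u) = '\\' :: pvR2 (d::u) := by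
  rw [pvR2.eq_def]
  split
  · next heq => exact absurd heq (by simp)
  · next heq =>
      injection heq with h1 h2; injection h2 with h3 h4; exact absurd h3 h
  · next heq => injection heq with h1 h2; subst h1; subst h2; rfl

-- one unfolding step of the PySem replace worker, specialised to our patterns
theorem pvGo1_succ (n : Nat) (c : Char) (t acc : List Char) :
    PySem.Chars.replace.go ['\\','\\'] [] (n+1) (c::t) acc =
    (if List.isPrefixOf ['\\','\\'] (c::t) then PySem.Chars.replace.go ['\\','\\'] [] n (t.drop 1) acc
     else PySem.Chars.replace.go ['\\','\\'] [] n t (c::acc)) := by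
  simp [PySem.Chars.replace.go]

theorem pvGo2_succ (n : Nat) (c : Char) (t acc : List Char) :
    PySem.Chars.replace.go ['\\','"'] [] (n+1) (c::t) acc =
    (if List.isPrefixOf ['\\','"'] (c::t) then PySem.Chars.replace.go ['\\','"'] [] n (t.drop 1) acc
     else PySem.Chars.replace.go ['\\','"'] [] n t (c::acc)) := by
  simp [PySem.Chars.replace.go]

theorem pvCntGo_succ (n : Nat) (c : Char) (t : List Char) (acc : Nat) :
    PySem.Chars.count.go ['"'] (n+1) (c::t) acc =
    (if c = '"' then PySem.Chars.count.go ['"'] n t (acc+1)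
     else PySem.Chars.count.go ['"'] n t acc) := by
  by_cases h : c = '"'
  · simp [PySem.Chars.count.go, List.isPrefixOf, h]
  · simp [PySem.Chars.count.go, List.isPrefixOf, h, Ne.symm h]

theorem pvR1_go : ∀ (fuel : Nat) (l acc : List Char), l.length ≤ fuel →
    PySem.Chars.replace.go ['\\','\\'] [] fuel l acc = acc.reverse ++ pvR1 l := by
  intro fuel
  induction fuel with
  | zero =>
    intro l acc hl
    have : l = [] := List.eq_nil_of_length_eq_zero (Nat.le_zero.mp hl)
    subst this; simp [PySem.Chars.replace.go, pvR1]
  | succ n ih =>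
    intro l acc hl
    match l with
    | [] => simp [PySem.Chars.replace.go, pvR1]
    | c :: t =>
      rw [pvGo1_succ]
      by_cases hc : c = '\\'
      · subst hc
        match t with
        | [] =>
          rw [if_neg (by simp [List.isPrefixOf])]
          rw [ih [] _ (by simp)]
          simp [pvR1]
        | d :: u =>
          by_cases hd : d = '\\'
          · subst hd
            rw [if_pos (by simp [List.isPrefixOf])]
            rw [List.drop_one, List.tail_cons, ih u _ (by simp at hl ⊢; omega)]
            rfl
          · rw [if_neg (by simp [List.isPrefixOf, hd, Ne.symm hd])]
            rw [ih (d::u) _ (by simp at hl ⊢; omega), pvR1_bs_ne d u hd]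
            simp
      · rw [if_neg (by simp [List.isPrefixOf, hc, Ne.symm hc])]
        rw [ih t _ (by simp at hl ⊢; omega), pvR1_cons_ne c t hc]
        simp

theorem pvR2_go : ∀ (fuel : Nat) (l acc : List Char), l.length ≤ fuel →
    PySem.Chars.replace.go ['\\','"'] [] fuel l acc = acc.reverse ++ pvR2 l := by
  intro fuel
  induction fuel with
  | zero =>
    intro l acc hl
    have : l = [] := List.eq_nil_of_length_eq_zero (Nat.le_zero.mp hl)
    subst this; simp [PySem.Chars.replace.go, pvR2]
  | succ n ih =>
    intro l acc hl
    match l with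
    | [] => simp [PySem.Chars.replace.go, pvR2]
    | c :: t =>
      rw [pvGo2_succ]
      by_cases hc : c = '\\'
      · subst hc
        match t with
        | [] =>
          rw [if_neg (by simp [List.isPrefixOf])]
          rw [ih [] _ (by simp)]
          simp [pvR2]
        | d :: u =>
          by_cases hd : d = '"'
          · subst hd
            rw [if_pos (by simp [List.isPrefixOf])]
            rw [List.drop_one, List.tail_cons, ih u _ (by simp at hl ⊢; omega)]
            rfl
          · rw [if_neg (by simp [List.isPrefixOf, hd, Ne.symm hd])]
            rw [ih (d::u) _ (by simp at hl ⊢; omega), pvR2_bs_ne d u hd]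
            simp
      · rw [if_neg (by simp [List.isPrefixOf, hc, Ne.symm hc])]
        rw [ih t _ (by simp at hl ⊢; omega), pvR2_cons_ne c t hc]
        simp

theorem pvCnt_go : ∀ (fuel : Nat) (l : List Char) (acc : Nat), l.length ≤ fuel →
    PySem.Chars.count.go ['"'] fuel l acc = acc + l.count '"' := by
  intro fuel
  induction fuel with
  | zero =>
    intro l acc hl
    have : l = [] := List.eq_nil_of_length_eq_zero (Nat.le_zero.mp hl)
    subst this; simp [PySem.Chars.count.go]
  | succ n ih =>
    intro l acc hl
    match l with
    | [] => simp [PySem.Chars.count.go]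
    | c :: t =>
      rw [pvCntGo_succ]
      by_cases h : c = '"'
      · subst h
        rw [if_pos rfl, ih t _ (by simp at hl ⊢; omega), List.count_cons_self]
        omega
      · rw [if_neg h, ih t _ (by simp at hl ⊢; omega), List.count_cons_of_ne h]

-- the two replacements really compute pvR2 ∘ pvR1
theorem pvReplace1_eq (l : List Char) :
    PySem.Chars.replace l ['\\','\\'] [] = pvR1 l := by
  rw [PySem.Chars.replace, if_neg (by simp), pvR1_go l.length l [] (le_refl _)]
  simp

theorem pvReplace2_eq (l : List Char) :
    PySem.Chars.replace l ['\\','"'] [] = pvR2 l := by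
  rw [PySem.Chars.replace, if_neg (by simp), pvR2_go l.length l [] (le_refl _)]
  simp

theorem pvCount_eq (l : List Char) :
    PySem.Chars.count l ['"'] = l.count '"' := by
  rw [PySem.Chars.count, if_neg (by simp), pvCnt_go l.length l 0 (le_refl _)]
  omega

-- parity of unescaped quotes, exactly what B computes inside the guard
def pvQ (l : List Char) : Bool := (pvR2 (pvR1 l)).count '"' % 2 == 1

theorem pvQ_cons_quote (t : List Char) : pvQ ('"' :: t) = !(pvQ t) := by
  simp only [pvQ, pvR1_cons_ne '"' t (by decide), pvR2_cons_ne '"' _ (by decide)]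
  rw [List.count_cons_self]
  rcases Nat.mod_two_eq_zero_or_one ((pvR2 (pvR1 t)).count '"') with h | h <;>
    simp [Nat.add_mod, h]

theorem pvQ_cons_other (c : Char) (t : List Char) (h1 : c ≠ '\\') (h2 : c ≠ '"') :
    pvQ (c :: t) = pvQ t := by
  simp only [pvQ, pvR1_cons_ne c t h1, pvR2_cons_ne c _ h1]
  rw [List.count_cons_of_ne h2]

theorem pvQ_bs_skip (d : Char) (u : List Char) (h : d ≠ '\\') :
    pvQ ('\\' :: d :: u) = pvQ u := by
  by_cases hq : d = '"'
  · subst hq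
    simp only [pvQ, pvR1_bs_ne '"' u (by decide), pvR1_cons_ne '"' u (by decide)]
    rfl
  · simp only [pvQ, pvR1_bs_ne d u h, pvR1_cons_ne d u h,
      pvR2_bs_ne d _ hq, pvR2_cons_ne d _ h]
    simp [hq]

theorem pvQ_bs_bs (u : List Char) : pvQ ('\\' :: '\\' :: u) = pvQ u := rfl

theorem pv_main : ∀ (n : Nat) (l : List Char), l.length ≤ n → ∀ b : Bool,
    (l.foldl pvStepA (b, false)).1 = (b != pvQ l) := by
  intro n
  induction n with
  | zero =>
    intro l hl b
    have : l = [] := List.eq_nil_of_length_eq_zero (Nat.le_zero.mp hl)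
    subst this; simp [pvQ, pvR1, pvR2]
  | succ n ih =>
    intro l hl b
    match l with
    | [] => simp [pvQ, pvR1, pvR2]
    | c :: t =>
      by_cases hbs : c = '\\'
      · subst hbs
        match t with
        | [] => simp [pvStepA, pvQ, pvR1, pvR2]
        | d :: u =>
          have hs : List.foldl pvStepA (b, false) ('\\' :: d :: u)
              = List.foldl pvStepA (b, false) u := by
            simp [List.foldl, pvStepA]
          rw [hs, ih u (by simp at hl ⊢; omega) b]
          by_cases hd : d = '\\'
          · subst hd; rw [pvQ_bs_bs]
          · rw [pvQ_bs_skip d u hd]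
      · by_cases hq : c = '"'
        · subst hq
          have hs : List.foldl pvStepA (b, false) ('"' :: t)
              = List.foldl pvStepA (!b, false) t := by
            simp [List.foldl, pvStepA]
          rw [hs, ih t (by simp at hl ⊢; omega) (!b), pvQ_cons_quote]
          cases b <;> cases pvQ t <;> rfl
        · have hs : List.foldl pvStepA (b, false) (c :: t)
              = List.foldl pvStepA (b, false) t := by
            simp [List.foldl, pvStepA, hbs, hq]
          rw [hs, ih t (by simp at hl ⊢; omega) b, pvQ_cons_other c t hbs hq]

-- ===== VERDICT (by name: the statement is the Claim_ definition above) =====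
theorem should_skip_line_spec : Claim_equal_should_skip_line := by
  intro line _
  unfold Spec_should_skip_line
  have key : (if (List.foldl pvStepA (false, false) line.toList).1 = true then true else false)
      = ((PySem.Str.count (PySem.Str.replace (PySem.Str.replace line "\\\\" "") "\\\"" "") "\"" % 2) == 1) := by
    have hred : (PySem.Str.replace (PySem.Str.replace line "\\\\" "") "\\\"" "").toList
        = pvR2 (pvR1 line.toList) := by
      rw [PySem.Str.toList_replace, PySem.Str.toList_replace]
      show PySem.Chars.replace (PySem.Chars.replace line.toList ['\\','\\'] []) ['\\','"'] []
        = pvR2 (pvR1 line.toList)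
      rw [pvReplace1_eq, pvReplace2_eq]
    have hcnt : PySem.Str.count (PySem.Str.replace (PySem.Str.replace line "\\\\" "") "\\\"" "") "\""
        = (pvR2 (pvR1 line.toList)).count '"' := by
      rw [PySem.Str.count_eq, hred]
      exact pvCount_eq _
    rw [hcnt, pv_main line.toList.length line.toList (le_refl _) false]
    cases h : ((pvR2 (pvR1 line.toList)).count '"' % 2 == 1) <;> simp_all [pvQ]
  simp only [should_skip_line, should_skip_line_alt]
  rw [key]
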